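-- pv_equiv track=rewrite | github.com/cadulaschi/carbometrix_carlos | Carbometrix_Project/CDP_xml.py | section_questionnaire
-- ===== SOURCE A (Python) =====
-- def section_questionnaire(questionnaire):
--     """
--     Organizing our questionary in sections
--
--     The list 'sections' has the information about each section within the questionary.
--
--     """
--
--     sections_name = ['C0. Introduction','C1. Governance', 'C2. Risks and opportunities',
--                     'C3. Business Strategy', 'C4. Targets and performance','C5. Emissions methodology',
--                     'C6. Emissions data', 'C7. Emissions breakdowns', 'C8. Energy',
--                     'C9. Additional metrics', 'C10. Verification', 'C11. Carbon pricing',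
--                     'C12. Engagement','C14. Signoff']
--
--     str_quest, sections = [], []
--
--     title = questionnaire[0]
--     questionnaire = questionnaire[1:]
--     sections_name = sections_name[1:] #Taking off 'C0: Introduction' to guarentee that the first section will be introduction
--
--     for phrase in questionnaire:
--         if phrase in sections_name:
--             sections.append(str_quest)
--             sections_name = sections_name[1:]
--             str_quest = []
--         str_quest.append(phrase)
--
--     return title, sections
-- ===== SOURCE B (Python) =====
-- CDP_SECTION_NAMES = ['C0. Introduction', 'C1. Governance', 'C2. Risks and opportunities',
--                      'C3. Business Strategy', 'C4. Targets and performance', 'C5. Emissions methodology',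
--                      'C6. Emissions data', 'C7. Emissions breakdowns', 'C8. Energy',
--                      'C9. Additional metrics', 'C10. Verification', 'C11. Carbon pricing',
--                      'C12. Engagement', 'C14. Signoff']
--
--
-- def section_questionnaire(questionnaire):
--     """Two-pass version: first record section-boundary indices, then slice
--     between consecutive boundaries (the chunk after the last boundary is,
--     as in the original, not part of any section)."""
--     names = CDP_SECTION_NAMES[1:]  # first section is always the introduction
--     title = questionnaire[0]
--     rest = questionnaire[1:]
--     boundaries = [0]
--     k = 0  # how many section names have been consumed so far
--     for i, phrase in enumerate(rest):
--         if phrase in names[k:]: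
--             boundaries.append(i)
--             k += 1
--     sections = [rest[a:b] for a, b in zip(boundaries, boundaries[1:])]
--     return title, sections
-- ===== Notes on version B (the rewrite author's own statement) =====
-- stated objective: alternative
-- what changed: A builds the sections in one pass by accumulating the current chunk and appending it on each section-name hit; B makes two passes: it first records the boundary indices where a remaining section name occurs, then builds every section by slicing questionnaire[1:] between consecutive boundaries.
-- outside the precondition, e.g. on section_questionnaire([]): A raises IndexError, B raises IndexError
import Mathlib
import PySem

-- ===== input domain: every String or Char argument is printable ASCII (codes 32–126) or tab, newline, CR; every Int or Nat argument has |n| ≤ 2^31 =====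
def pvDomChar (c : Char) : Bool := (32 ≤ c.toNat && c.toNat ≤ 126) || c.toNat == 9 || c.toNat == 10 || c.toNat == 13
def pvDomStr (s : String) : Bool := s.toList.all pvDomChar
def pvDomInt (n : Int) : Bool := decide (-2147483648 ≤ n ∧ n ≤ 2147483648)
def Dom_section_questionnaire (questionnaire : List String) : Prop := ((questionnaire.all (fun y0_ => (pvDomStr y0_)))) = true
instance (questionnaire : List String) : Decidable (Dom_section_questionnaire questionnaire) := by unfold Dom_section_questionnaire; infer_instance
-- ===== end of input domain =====

-- B replaces A's one-pass chunk accumulation by two passes (record boundary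
-- indices, then slice between consecutive boundaries): same cost, different decomposition.

-- shared constant data (the CDP section-name table both Pythons carry)
def sectionNames : List String :=
  ["C0. Introduction", "C1. Governance", "C2. Risks and opportunities",
   "C3. Business Strategy", "C4. Targets and performance", "C5. Emissions methodology",
   "C6. Emissions data", "C7. Emissions breakdowns", "C8. Energy",
   "C9. Additional metrics", "C10. Verification", "C11. Carbon pricing",
   "C12. Engagement", "C14. Signoff"]

-- ===== PORT A =====
-- single pass over questionnaire[1:], shrinking name list, chunks accumulated directly;
-- title = questionnaire[0] (Pre_ excludes [], where Python raises IndexError, so headD's default is unreachable)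
def section_questionnaire (questionnaire : List String) : String × List (List String) :=
  let title := questionnaire.headD ""
  let rest := PySem.List.slice questionnaire (some 1) none
  let init : List String × List (List String) × List String := ([], [], sectionNames.drop 1)
  let fin := rest.foldl (fun st phrase =>
    if st.2.2.contains phrase then
      ([phrase], st.2.1 ++ [st.1], st.2.2.drop 1)
    else (st.1 ++ [phrase], st.2.1, st.2.2)) init
  (title, fin.2.1)

-- ===== PORT B =====
-- pass 1 records boundary indices with a consumed-names counter k (a nonnegative
-- Python int: names[k:] is ported as names.drop k, exact for k ≥ 0);
-- pass 2 slices rest between consecutive boundaries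
def section_questionnaire_alt (questionnaire : List String) : String × List (List String) :=
  let names := sectionNames.drop 1
  let title := questionnaire.headD ""
  let rest := PySem.List.slice questionnaire (some 1) none
  let st := (PySem.List.enumerate rest).foldl
    (fun (st : List Int × Nat) p =>
      if (names.drop st.2).contains p.2 then (st.1 ++ [p.1], st.2 + 1) else st)
    ([0], 0)
  let sections := (st.1.zip (st.1.drop 1)).map
    (fun ab => PySem.List.slice rest (some ab.1) (some ab.2))
  (title, sections)

-- ===== PRECONDITION & SPEC =====
-- Pre_ excludes only the empty list, on which Python A raises IndexError at questionnaire[0].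
def Pre_section_questionnaire (questionnaire : List String) : Prop := questionnaire ≠ []
instance (questionnaire : List String) : Decidable (Pre_section_questionnaire questionnaire) := by unfold Pre_section_questionnaire; infer_instance
def pvWitness_section_questionnaire : List String := ["CDP questionnaire", "intro text", "C1. Governance", "answer"]
def Spec_section_questionnaire (questionnaire : List String) (out : String × List (List String)) : Prop := out = section_questionnaire_alt questionnaire
instance (questionnaire : List String) (out : String × List (List String)) : Decidable (Spec_section_questionnaire questionnaire out) := by unfold Spec_section_questionnaire; infer_instance

-- ===== CLAIM (what is proved, stated in full; the proofs are below) =====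
def Claim_equal_section_questionnaire : Prop := ∀ (questionnaire : List String), Dom_section_questionnaire questionnaire → Pre_section_questionnaire questionnaire → Spec_section_questionnaire questionnaire (section_questionnaire questionnaire)

-- ===== LEMMAS AND PROOFS =====

-- A's loop, written as structural recursion producing the list of chunks
def chunksA : List String → List String → Nat → List (List String)
  | [], _, _ => []
  | x :: l, sq, k =>
    if ((sectionNames.drop 1).drop k).contains x then sq :: chunksA l [x] (k + 1)
    else chunksA l (sq ++ [x]) k

-- B's first pass, written as structural recursion producing the boundary indices (as naturals)
def bndsN : List String → Nat → Nat → List Nat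
  | [], _, _ => []
  | x :: l, k, i =>
    if ((sectionNames.drop 1).drop k).contains x then i :: bndsN l (k + 1) (i + 1)
    else bndsN l k (i + 1)

-- B's second pass on natural boundaries
def secsOf (r : List String) (bs : List Nat) : List (List String) :=
  (bs.zip (bs.drop 1)).map (fun ab => (r.drop ab.1).take (ab.2 - ab.1))

theorem foldA_eq_chunksA (l : List String) : ∀ (sq : List String) (secs : List (List String)) (k : Nat),
    (l.foldl (fun st phrase =>
      if st.2.2.contains phrase then
        (([phrase] : List String), st.2.1 ++ [st.1], st.2.2.drop 1)
      else (st.1 ++ [phrase], st.2.1, st.2.2)) (sq, secs, (sectionNames.drop 1).drop k)).2.1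
      = secs ++ chunksA l sq k := by
  induction l with
  | nil => intro sq secs k; simp [chunksA]
  | cons x l ih =>
    intro sq secs k
    by_cases h : ((sectionNames.drop 1).drop k).contains x
    · simp only [List.foldl_cons, h, if_pos, chunksA]
      rw [show List.drop 1 (List.drop k (List.drop 1 sectionNames))
            = List.drop (k + 1) (List.drop 1 sectionNames) by rw [List.drop_drop, Nat.add_comm]]
      rw [ih [x] (secs ++ [sq]) (k + 1)]
      simp
    · simp only [List.foldl_cons, chunksA, h, Bool.false_eq_true, if_false]
      rw [ih (sq ++ [x]) secs k]

theorem foldB_eq_bndsN (l : List String) : ∀ (bs : List Int) (k j : Nat),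
    ((PySem.List.enumerate l (j : Int)).foldl
      (fun (st : List Int × Nat) p =>
        if (((sectionNames.drop 1)).drop st.2).contains p.2 then (st.1 ++ [p.1], st.2 + 1) else st)
      (bs, k)).1
      = bs ++ (bndsN l k j).map (fun n : Nat => (n : Int)) := by
  induction l with
  | nil => intro bs k j; simp [PySem.List.enumerate_nil, bndsN]
  | cons x l ih =>
    intro bs k j
    rw [PySem.List.enumerate_cons]
    by_cases h : ((sectionNames.drop 1).drop k).contains x
    · simp only [List.foldl_cons, h, if_pos, bndsN]
      rw [show ((j : Int) + 1) = ((j + 1 : Nat) : Int) by push_cast; ring]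
      rw [ih (bs ++ [(j : Int)]) (k + 1) (j + 1)]
      simp
    · simp only [List.foldl_cons, bndsN, h, Bool.false_eq_true, if_false]
      rw [show ((j : Int) + 1) = ((j + 1 : Nat) : Int) by push_cast; ring]
      rw [ih bs k (j + 1)]

theorem castSecs (r : List String) (bs : List Nat) :
    ((bs.map (fun n : Nat => (n : Int))).zip ((bs.map (fun n : Nat => (n : Int))).drop 1)).map
      (fun ab => PySem.List.slice r (some ab.1) (some ab.2)) = secsOf r bs := by
  rw [secsOf, ← List.map_drop, List.zip_map, List.map_map]
  apply List.map_congr_left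
  intro ab _
  simp [Prod.map, PySem.List.slice_natCast]

theorem chunksA_eq_secsOf (l : List String) : ∀ (p : List String) (k b : Nat), b ≤ p.length →
    chunksA l (p.drop b) k = secsOf (p ++ l) (b :: bndsN l k p.length) := by
  induction l with
  | nil => intro p k b _; simp [chunksA, bndsN, secsOf]
  | cons x l ih =>
    intro p k b hb
    by_cases h : ((sectionNames.drop 1).drop k).contains x
    · rw [chunksA, if_pos h, bndsN, if_pos h]
      have h1 : secsOf (p ++ x :: l) (b :: p.length :: bndsN l (k + 1) (p.length + 1))
          = ((p ++ x :: l).drop b).take (p.length - b)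
            :: secsOf (p ++ x :: l) (p.length :: bndsN l (k + 1) (p.length + 1)) := by
        simp [secsOf]
      rw [h1]
      have h2 : ((p ++ x :: l).drop b).take (p.length - b) = p.drop b := by
        rw [List.drop_append_of_le_length hb]
        exact List.take_left' (by simp)
      rw [h2]
      have h3 := ih (p ++ [x]) (k + 1) p.length (by simp)
      simp only [List.drop_append_of_le_length (le_refl p.length), List.drop_length,
        List.nil_append, List.length_append, List.length_cons, List.length_nil] at h3
      rw [show p ++ [x] ++ l = p ++ x :: l by simp] at h3
      rw [h3]
    · rw [chunksA, if_neg h, bndsN, if_neg h]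
      have h3 := ih (p ++ [x]) k b (by simp; omega)
      rw [List.drop_append_of_le_length hb] at h3
      rw [show p ++ [x] ++ l = p ++ x :: l by simp] at h3
      simp only [List.length_append, List.length_cons, List.length_nil] at h3
      rw [h3]

-- ===== VERDICT (by name: the statement is the Claim_ definition above) =====
theorem section_questionnaire_spec : Claim_equal_section_questionnaire := by
  intro q _ _
  unfold Spec_section_questionnaire section_questionnaire section_questionnaire_alt
  simp only []
  apply Prod.ext
  · rfl
  · show ((PySem.List.slice q (some 1) none).foldl _ ([], [], sectionNames.drop 1)).2.1 = _
    set rest := PySem.List.slice q (some 1) none with hrest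
    have hA : ((rest.foldl (fun st phrase =>
        if st.2.2.contains phrase then
          (([phrase] : List String), st.2.1 ++ [st.1], st.2.2.drop 1)
        else (st.1 ++ [phrase], st.2.1, st.2.2)) ([], [], sectionNames.drop 1)).2.1 : List (List String))
        = chunksA rest [] 0 := by
      have := foldA_eq_chunksA rest [] [] 0
      simpa using this
    have hB := foldB_eq_bndsN rest [(0 : Int)] 0 0
    rw [Nat.cast_zero] at hB
    rw [hA, hB]
    have e : ([(0 : Int)] ++ (bndsN rest 0 0).map (fun n : Nat => (n : Int)))
        = (0 :: bndsN rest 0 0).map (fun n : Nat => (n : Int)) := by simp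
    rw [e, castSecs]
    have := chunksA_eq_secsOf rest [] 0 0 (by simp)
    simpa using this
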